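-- pv_equiv track=rewrite | github.com/evotianusx/evotianusx.github.io | main.py | recursive_process
-- ===== SOURCE A (Python) =====
-- from functools import reduce
--
-- def read_ints_from_line(line):
--     """
--     Convert a line of space-separated numbers into a list of ints.
--     Example: "3 -1 1 10" -> [3, -1, 1, 10]
--     """
--     return list(map(int, line.strip().split())) if line.strip() else []
--
-- def sum_negative_fourth_powers(nums):
--     """
--     Take only the negative numbers from nums,
--     raise them to the 4th power, and return the sum.
--     Example: [3, -1, 1, 10] -> (-1)^4 = 1
--     """
--     negatives = list(filter(lambda x: x < 0, nums))
--     return reduce(lambda acc, y: acc + (y ** 4), negatives, 0)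
--
-- def process_case(case_lines):
--     """
--     Process a single test case.
--     case_lines is a list with two elements:
--         [0] -> the integer X (count of expected numbers)
--         [1] -> the line containing the numbers
--     If the number of provided integers != X, return -1.
--     Otherwise, return the sum of 4th powers of negatives.
--     """
--     if len(case_lines) < 2:
--         return -1
--     try:
--         x = int(case_lines[0].strip())
--         nums = read_ints_from_line(case_lines[1])
--     except Exception:
--         return -1
--
--     if len(nums) != x:
--         return -1
--     return sum_negative_fourth_powers(nums)
--
-- def recursive_process(cases, idx=0, acc=None):
--     """
--     Recursively process all test cases.
--     No loops allowed, so we move through the list with recursion.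
--     """
--     if acc is None:
--         acc = []
--     if idx >= len(cases):
--         return acc
--     result = process_case(cases[idx])
--     acc.append(result)
--     return recursive_process(cases, idx + 1, acc)
-- ===== SOURCE B (Python) =====
-- def process_case(case_lines):
--     try:
--         x = int(case_lines[0].strip())
--         nums = [int(t) for t in case_lines[1].strip().split()]
--     except (IndexError, ValueError):
--         return -1
--     if len(nums) != x:
--         return -1
--     return sum(v ** 4 for v in nums if v < 0)
--
--
-- def recursive_process(cases, idx=0, acc=None):
--     if acc is None:
--         acc = []
--     for i in range(idx, len(cases)):
--         acc.append(process_case(cases[i]))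
--     return acc
-- ===== Notes on version B (the rewrite author's own statement) =====
-- stated objective: simpler
-- what changed: Replaces the tail recursion over an index (and the recursive helper-call chain with its explicit len<2 guard) by a single iterative for-loop over range(idx, len(cases)) appending per-case results, with the per-case work folded into one try-block that lets IndexError/ValueError signal the invalid case.
import Mathlib
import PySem

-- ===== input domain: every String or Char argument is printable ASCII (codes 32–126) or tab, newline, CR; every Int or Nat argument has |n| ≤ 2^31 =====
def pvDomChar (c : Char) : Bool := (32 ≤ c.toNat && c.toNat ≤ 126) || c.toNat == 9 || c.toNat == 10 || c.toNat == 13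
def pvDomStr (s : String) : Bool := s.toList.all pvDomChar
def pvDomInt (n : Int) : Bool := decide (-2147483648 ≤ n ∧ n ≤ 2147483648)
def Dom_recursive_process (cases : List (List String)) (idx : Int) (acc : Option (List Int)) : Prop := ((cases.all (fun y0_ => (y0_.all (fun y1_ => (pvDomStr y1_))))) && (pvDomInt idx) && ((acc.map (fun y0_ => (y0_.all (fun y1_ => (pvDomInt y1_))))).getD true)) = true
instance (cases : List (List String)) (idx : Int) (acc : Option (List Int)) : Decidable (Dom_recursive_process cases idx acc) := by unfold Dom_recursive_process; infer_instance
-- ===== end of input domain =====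

-- B replaces A's tail recursion over indices by a single iterative loop over range(idx, len(cases))
-- (same return value; like A, B mutates a caller-supplied acc in place — the equivalence here is about the return value).

-- ===== PORT A =====
def pvReadInts (line : String) : Option (List Int) :=
  -- read_ints_from_line; 'none' = some int() raised ValueError (caught by process_case)
  if PySem.Str.strip line = "" then some []
  else (PySem.Str.split₀ (PySem.Str.strip line)).mapM PySem.Int.ofStr?

def pvSumNegFourth (nums : List Int) : Int :=
  -- sum_negative_fourth_powers: filter then reduce
  (nums.filter (fun x => x < 0)).foldl (fun acc y => acc + y ^ 4) 0

def pvProcessCase (case_lines : List String) : Int :=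
  if case_lines.length < 2 then -1
  else
    match PySem.Int.ofStr? (PySem.Str.strip (PySem.List.pyGetD case_lines 0 "")),
          pvReadInts (PySem.List.pyGetD case_lines 1 "") with
    | some x, some nums =>
        if (nums.length : Int) ≠ x then -1 else pvSumNegFourth nums
    | _, _ => -1

def pvRecAux (cases : List (List String)) (idx : Int) (acc : List Int) : List Int :=
  if _h : (cases.length : Int) ≤ idx then acc
  else
    match PySem.List.pyGet? cases idx with
    | none => acc   -- cases[idx] raises IndexError in Python; Pre_ excludes this branch
    | some c => pvRecAux cases (idx + 1) (acc ++ [pvProcessCase c])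
termination_by ((cases.length : Int) - idx).toNat
decreasing_by omega

def recursive_process (cases : List (List String)) (idx : Int) (acc : Option (List Int)) : List Int :=
  pvRecAux cases idx (acc.getD [])

-- ===== PORT B =====
def pvProcessCaseAlt (cl : List String) : Int :=
  -- B's process_case: try indexing/int-parsing, IndexError/ValueError -> -1
  match PySem.List.pyGet? cl 0, PySem.List.pyGet? cl 1 with
  | some l0, some l1 =>
    match PySem.Int.ofStr? (PySem.Str.strip l0),
          (PySem.Str.split₀ (PySem.Str.strip l1)).mapM PySem.Int.ofStr? with
    | some x, some nums =>
        if (nums.length : Int) ≠ x then -1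
        else ((nums.filter (fun v => v < 0)).map (fun v => v ^ 4)).sum
    | _, _ => -1
  | _, _ => -1

def recursive_process_alt (cases : List (List String)) (idx : Int) (acc : Option (List Int)) : List Int :=
  (PySem.List.pyRange idx (cases.length : Int) 1).foldl
    (fun a i => a ++ [pvProcessCaseAlt (PySem.List.pyGetD cases i [])]) (acc.getD [])

-- ===== PRECONDITION & SPEC =====
-- Pre_ excludes idx < -len(cases), where both Pythons raise IndexError on cases[idx].
def Pre_recursive_process (cases : List (List String)) (idx : Int) (_acc : Option (List Int)) : Prop :=
  -(cases.length : Int) ≤ idx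

instance (cases : List (List String)) (idx : Int) (acc : Option (List Int)) : Decidable (Pre_recursive_process cases idx acc) := by unfold Pre_recursive_process; infer_instance

def pvWitness_recursive_process : List (List String) × Int × Option (List Int) :=
  ([["1", "-2"], ["2", "3 -1"]], 0, none)

def Spec_recursive_process (cases : List (List String)) (idx : Int) (acc : Option (List Int)) (out : List Int) : Prop := out = recursive_process_alt cases idx acc
instance (cases : List (List String)) (idx : Int) (acc : Option (List Int)) (out : List Int) : Decidable (Spec_recursive_process cases idx acc out) := by unfold Spec_recursive_process; infer_instance

-- ===== CLAIM (what is proved, stated in full; the proofs are below) =====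
def Claim_equal_recursive_process : Prop := ∀ (cases : List (List String)) (idx : Int) (acc : Option (List Int)), Dom_recursive_process cases idx acc → Pre_recursive_process cases idx acc → Spec_recursive_process cases idx acc (recursive_process cases idx acc)

-- ===== LEMMAS AND PROOFS =====
theorem pvSum4_eq (l : List Int) :
    l.foldl (fun acc y => acc + y ^ 4) 0 = (l.map (fun y => y ^ 4)).sum := by
  rw [List.sum_eq_foldl, List.foldl_map]

theorem pvReadInts_eq (line : String) :
    pvReadInts line = (PySem.Str.split₀ (PySem.Str.strip line)).mapM PySem.Int.ofStr? := by
  unfold pvReadInts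
  split_ifs with h
  · rw [h]; rfl
  · rfl

theorem pvPc_eq (cl : List String) : pvProcessCase cl = pvProcessCaseAlt cl := by
  match cl with
  | [] =>
    simp [pvProcessCase, pvProcessCaseAlt, PySem.List.pyGet?_zero]
  | [a] =>
    have g1 : PySem.List.pyGet? [a] 1 = none := by
      rw [PySem.List.pyGet?_eq_none_iff]; simp [PySem.Raise.InRange]
    simp [pvProcessCase, pvProcessCaseAlt, g1]
  | a :: b :: t =>
    have g0 : PySem.List.pyGet? (a :: b :: t) 0 = some a := by
      simp [PySem.List.pyGet?_zero]
    have g1 : PySem.List.pyGet? (a :: b :: t) 1 = some b := by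
      simp [PySem.List.pyGet?, PySem.List.pyIdx?]
    have h0 : PySem.List.pyGetD (a :: b :: t) 0 "" = a := by
      simp [PySem.List.pyGetD_zero_cons]
    have h1 : PySem.List.pyGetD (a :: b :: t) 1 "" = b := by
      simp [PySem.List.pyGetD, PySem.List.pyGet?, PySem.List.pyIdx?]
    have hlen : ¬ ((a :: b :: t).length < 2) := by simp
    simp only [pvProcessCase, pvProcessCaseAlt, g0, g1, h0, h1, hlen, if_false, pvReadInts_eq]
    cases hx : PySem.Int.ofStr? (PySem.Str.strip a) <;>
      cases hn : (PySem.Str.split₀ (PySem.Str.strip b)).mapM PySem.Int.ofStr? <;>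
        simp [pvSumNegFourth, pvSum4_eq]

theorem pvAux_eq (cases : List (List String)) :
    ∀ (n : Nat) (idx : Int) (acc : List Int),
      ((cases.length : Int) - idx).toNat = n → -(cases.length : Int) ≤ idx →
      pvRecAux cases idx acc =
        (PySem.List.pyRange idx (cases.length : Int) 1).foldl
          (fun a i => a ++ [pvProcessCaseAlt (PySem.List.pyGetD cases i [])]) acc := by
  intro n
  induction n with
  | zero =>
    intro idx acc hn _
    have hge : (cases.length : Int) ≤ idx := by omega
    rw [pvRecAux, dif_pos hge, PySem.List.pyRange_one_eq_nil hge, List.foldl_nil]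
  | succ m ih =>
    intro idx acc hn hlo
    have hlt : idx < (cases.length : Int) := by omega
    have hin : PySem.Raise.InRange cases.length idx := by
      simp [PySem.Raise.InRange]; omega
    obtain ⟨c, hc⟩ : ∃ c, PySem.List.pyGet? cases idx = some c := by
      rw [← Option.ne_none_iff_exists']
      simp [PySem.List.pyGet?_eq_none_iff, hin]
    have hd : PySem.List.pyGetD cases idx [] = c := by
      simp [PySem.List.pyGetD, hc]
    rw [pvRecAux, dif_neg (by omega), hc, PySem.List.pyRange_one_cons hlt, List.foldl_cons, hd]
    simp only [pvPc_eq]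
    exact ih (idx + 1) _ (by omega) (by omega)

-- ===== VERDICT (by name: the statement is the Claim_ definition above) =====
theorem recursive_process_spec : Claim_equal_recursive_process := by
  intro cases idx acc _ hpre
  unfold Spec_recursive_process recursive_process recursive_process_alt
  exact pvAux_eq cases _ idx (acc.getD []) rfl hpre
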